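-- pv_equiv track=rewrite | github.com/yaolinxia/algorithm | tengxun/4_2.py | solution
-- ===== SOURCE A (Python) =====
-- def solution(S, h, n):
--     count = 0
--
--     for s in S:
--         if set(s) != set(h):
--             continue
--         len_s = len(s)
--         c = n // len_s + 1
--
--         flag = True
--         for i in range(c - 1):
--             if s != h[i * len_s:(i + 1) * len_s]:
--                 flag = False
--                 break
--         if flag:
--             if h[(c - 1) * len_s:] == s[:(n - c * len_s)]:
--                 count += 1
--
--     return count
-- ===== SOURCE B (Python) =====
-- def solution(S, h, n):
--     hset = set(h)
--     cache = {}
--     count = 0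
--     for s in S:
--         if s not in cache:
--             ok = False
--             if set(s) == hset:
--                 q, r = divmod(n, len(s))
--                 ok = h == s * q + s[:r]
--             cache[s] = 1 if ok else 0
--         count += cache[s]
--     return count
-- ===== Notes on version B (the rewrite author's own statement) =====
-- stated objective: faster
-- what changed: B replaces A's per-candidate Python-level loop comparing h block by block against slices with a single comparison of h against the candidate repeated n//len(s) times plus a prefix of length n%len(s), computes set(h) once instead of per candidate, and memoises the per-candidate verdict so duplicate candidates are checked once; Pre_ excludes only the inputs (empty h with an empty candidate in S) on which both programs raise ZeroDivisionError.
import Mathlib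
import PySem

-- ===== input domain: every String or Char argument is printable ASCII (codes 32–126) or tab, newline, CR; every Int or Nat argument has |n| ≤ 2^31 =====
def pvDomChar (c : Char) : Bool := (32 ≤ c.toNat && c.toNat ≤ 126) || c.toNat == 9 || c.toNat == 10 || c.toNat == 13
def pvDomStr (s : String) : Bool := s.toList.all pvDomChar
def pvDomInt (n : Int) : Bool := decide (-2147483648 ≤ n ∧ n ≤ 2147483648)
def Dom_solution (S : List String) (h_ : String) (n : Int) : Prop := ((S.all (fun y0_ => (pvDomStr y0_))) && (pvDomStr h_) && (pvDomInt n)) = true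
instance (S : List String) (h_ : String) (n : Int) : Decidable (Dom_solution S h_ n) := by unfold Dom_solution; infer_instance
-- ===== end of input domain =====

-- B replaces A's per-candidate block-by-block slice loop with one comparison of h against the
-- candidate repeated n//len(s) times plus a prefix, computes set(h) once, and memoises the
-- per-candidate verdict (objective: faster by constant factor).

-- ===== PORT A =====
-- the inner 'for i in range(c - 1)' loop with its break: False as soon as one block differs
def pvALoop (sl hl : List Char) (L : Int) : List Int → Bool
  | [] => true
  | i :: rest =>
    if sl ≠ PySem.List.slice hl (some (i * L)) (some ((i + 1) * L)) then false
    else pvALoop sl hl L rest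

def solution (S : List String) (h_ : String) (n : Int) : Int :=
  S.foldl (fun count s =>
    if ¬ (PySem.Set.equal (PySem.Set.ofList s.toList) (PySem.Set.ofList h_.toList) = true) then count
    else
      let len_s : Int := s.toList.length
      let c : Int := PySem.Int.floordiv n len_s + 1
      let flag := pvALoop s.toList h_.toList len_s (PySem.List.pyRange 0 (c - 1) 1)
      if flag then
        if PySem.List.slice h_.toList (some ((c - 1) * len_s)) none
             = PySem.List.slice s.toList none (some (n - c * len_s)) then count + 1
        else count
      else count) 0

-- ===== PORT B =====
-- Source B's per-candidate verdict (0 or 1): 'ok = h == s * q + s[:r]' with q, r = divmod(n, len(s))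
-- (Python's 's * q' is empty for q ≤ 0: List.replicate q.toNat is exact)
def pvBCheck (hl : List Char) (hset : PySem.Set Char) (n : Int) (sl : List Char) : Int :=
  if PySem.Set.equal (PySem.Set.ofList sl) hset = true then
    match PySem.Int.divmod? n (sl.length : Int) with
    | none => 0   -- Python raises here (len(s) = 0 with matching sets); unreachable under Pre_solution
    | some (q, r) =>
      if hl = (List.replicate q.toNat sl).flatten ++ PySem.List.slice sl none (some r) then 1 else 0
  else 0

def solution_alt (S : List String) (h_ : String) (n : Int) : Int :=
  let hset := PySem.Set.ofList h_.toList
  (S.foldl (fun (st : PySem.Dict String Int × Int) s =>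
      match st.1.get? s with
      | some r => (st.1, st.2 + r)
      | none =>
        let r := pvBCheck h_.toList hset n s.toList
        (st.1.insert s r, st.2 + r)) (PySem.Dict.empty, 0)).2

-- ===== PRECONDITION & SPEC =====
-- Pre_ excludes only the inputs on which BOTH programs raise ZeroDivisionError:
-- the empty string among the candidates together with an empty h.
def Pre_solution (S : List String) (h_ : String) (n : Int) : Prop := ¬ (h_ = "" ∧ "" ∈ S)
instance (S : List String) (h_ : String) (n : Int) : Decidable (Pre_solution S h_ n) := by unfold Pre_solution; infer_instance
def pvWitness_solution : List String × String × Int := (["ab", "abab", "ba"], "ababa", 5)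

def Spec_solution (S : List String) (h_ : String) (n : Int) (out : Int) : Prop := out = solution_alt S h_ n
instance (S : List String) (h_ : String) (n : Int) (out : Int) : Decidable (Spec_solution S h_ n out) := by unfold Spec_solution; infer_instance

-- ===== CLAIM (what is proved, stated in full; the proofs are below) =====
def Claim_equal_solution : Prop := ∀ (S : List String) (h_ : String) (n : Int), Dom_solution S h_ n → Pre_solution S h_ n → Spec_solution S h_ n (solution S h_ n)

-- ===== LEMMAS AND PROOFS =====

-- A's per-element contribution as a pure 0/1 value
def pvACheck (hl : List Char) (n : Int) (sl : List Char) : Int :=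
  if ¬ (PySem.Set.equal (PySem.Set.ofList sl) (PySem.Set.ofList hl) = true) then 0
  else
    let L : Int := sl.length
    let c : Int := PySem.Int.floordiv n L + 1
    if pvALoop sl hl L (PySem.List.pyRange 0 (c - 1) 1) then
      if PySem.List.slice hl (some ((c - 1) * L)) none
          = PySem.List.slice sl none (some (n - c * L)) then 1 else 0
    else 0

lemma pvALoop_iff (sl hl : List Char) (L : Int) (lst : List Int) :
    pvALoop sl hl L lst = true ↔ ∀ i ∈ lst, sl = PySem.List.slice hl (some (i * L)) (some ((i + 1) * L)) := by
  induction lst with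
  | nil => simp [pvALoop]
  | cons i rest ih =>
    by_cases h : sl = PySem.List.slice hl (some (i * L)) (some ((i + 1) * L))
    · rw [pvALoop, if_neg (by simp [h]), ih]
      simp only [List.forall_mem_cons]
      exact (and_iff_right h).symm
    · rw [pvALoop, if_pos (by simp [h])]
      simp only [List.forall_mem_cons]
      exact iff_of_false (by simp) (fun hc => h hc.1)

lemma pv_rep_iff (sl hl : List Char) (k r : Nat) :
    ((∀ i < k, (hl.drop (i * sl.length)).take sl.length = sl)
        ∧ hl.drop (k * sl.length) = sl.take r)
    ↔ hl = (List.replicate k sl).flatten ++ sl.take r := by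
  induction k generalizing hl with
  | zero => simp
  | succ k ih =>
    constructor
    · rintro ⟨hall, htail⟩
      have h0 : hl.take sl.length = sl := by simpa using hall 0 (Nat.succ_pos k)
      have hsplit : hl = sl ++ hl.drop sl.length := by
        conv_lhs => rw [← List.take_append_drop sl.length hl, h0]
      have hrest : hl.drop sl.length = (List.replicate k sl).flatten ++ sl.take r := by
        apply (ih (hl.drop sl.length)).mp
        refine ⟨fun i hi => ?_, ?_⟩
        · have := hall (i + 1) (by omega)
          simpa [List.drop_drop, Nat.add_mul, Nat.add_comm] using this
        · simpa [List.drop_drop, Nat.succ_mul, Nat.add_comm] using htail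
      rw [List.replicate_succ, List.flatten_cons, List.append_assoc, ← hrest]
      exact hsplit
    · intro heq
      have hdrop : hl.drop sl.length = (List.replicate k sl).flatten ++ sl.take r := by
        rw [heq, List.replicate_succ, List.flatten_cons, List.append_assoc,
          List.drop_append_of_le_length (le_refl _), List.drop_length, List.nil_append]
      have hrest := (ih (hl.drop sl.length)).mpr hdrop
      refine ⟨fun i hi => ?_, ?_⟩
      · cases i with
        | zero =>
          rw [heq, List.replicate_succ, List.flatten_cons, List.append_assoc]
          simp
        | succ i =>
          have := hrest.1 i (by omega)
          simpa [List.drop_drop, Nat.add_mul, Nat.add_comm] using this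
      · simpa [List.drop_drop, Nat.succ_mul, Nat.add_comm] using hrest.2

-- pointwise agreement of the two per-candidate verdicts, under Pre_
lemma pvCheck_eq (hl sl : List Char) (n : Int) (hpre : ¬ (hl = [] ∧ sl = [])) :
    pvACheck hl n sl = pvBCheck hl (PySem.Set.ofList hl) n sl := by
  unfold pvACheck pvBCheck
  by_cases hset : PySem.Set.equal (PySem.Set.ofList sl) (PySem.Set.ofList hl) = true
  · rw [if_neg (by simpa using hset), if_pos hset]
    have hsl : sl ≠ [] := by
      intro hnil
      have : hl = [] := by
        subst hnil
        simp [PySem.Set.equal, PySem.Set.issubset] at hset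
        exact List.eq_nil_iff_forall_not_mem.mpr hset
      exact hpre ⟨this, hnil⟩
    have hLpos : 0 < sl.length := List.length_pos_iff.mpr hsl
    have hL0 : (sl.length : Int) ≠ 0 := by exact_mod_cast Nat.pos_iff_ne_zero.mp hLpos
    simp only [PySem.Int.divmod?, if_neg hL0]
    set L : Int := (sl.length : Int) with hLdef
    have hdm : n.fdiv L = PySem.Int.floordiv n L := rfl
    have hdm2 : n.fmod L = PySem.Int.mod n L := rfl
    rw [hdm, hdm2]
    set q : Int := PySem.Int.floordiv n L with hq
    set rem : Int := PySem.Int.mod n L with hrem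
    have hqrl : q * L + rem = n := PySem.Int.floordiv_mul_add_mod n L
    have hLposZ : (0 : Int) < L := by rw [hLdef]; exact_mod_cast hLpos
    have hrem0 : 0 ≤ rem := PySem.Int.mod_nonneg n hLposZ
    have hremL : rem < L := PySem.Int.mod_lt n hLposZ
    have hc1 : q + 1 - 1 = q := by ring
    rw [hc1]
    have htail : n - (q + 1) * L = rem - L := by linarith [hqrl]
    have hr : (rem.toNat : Int) = rem := Int.toNat_of_nonneg hrem0
    have hrlt : rem.toNat < sl.length := by omega
    have hslice2 : PySem.List.slice sl none (some (rem - L)) = sl.take rem.toNat := by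
      have : rem - L = -(((sl.length - rem.toNat : Nat) : Int)) := by
        rw [hLdef]; omega
      rw [this, PySem.List.slice_to_neg_natCast sl _ (by omega)]
      congr 1
      omega
    have hslice3 : PySem.List.slice sl none (some rem) = sl.take rem.toNat := by
      rw [PySem.List.slice_to sl hrem0]
    rw [htail, hslice2, hslice3]
    by_cases hq0 : 0 ≤ q
    · -- q ≥ 0: A checks the q full blocks plus the tail; B compares h to the repeated string
      have hk : (q.toNat : Int) = q := Int.toNat_of_nonneg hq0
      have hloop : pvALoop sl hl L (PySem.List.pyRange 0 q 1) = true
          ↔ ∀ j < q.toNat, (hl.drop (j * sl.length)).take sl.length = sl := by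
        rw [pvALoop_iff]
        constructor
        · intro hall j hj
          have hmem : (j : Int) ∈ PySem.List.pyRange 0 q 1 := by
            rw [PySem.List.mem_pyRange_one]; omega
          have hthis := hall _ hmem
          have e1 : ((j : Int) * L) = ((j * sl.length : Nat) : Int) := by rw [hLdef]; push_cast; ring
          have e2 : ((j : Int) + 1) * L = ((j * sl.length : Nat) : Int) + ((sl.length : Nat) : Int) := by
            rw [hLdef]; push_cast; ring
          rw [e1, e2, PySem.List.slice_natCast_add] at hthis
          exact hthis.symm
        · intro hall i hmem
          rw [PySem.List.mem_pyRange_one] at hmem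
          obtain ⟨j, rfl⟩ : ∃ j : Nat, (j : Int) = i := ⟨i.toNat, Int.toNat_of_nonneg hmem.1⟩
          have := (hall j (by omega)).symm
          have e1 : ((j : Int) * L) = ((j * sl.length : Nat) : Int) := by rw [hLdef]; push_cast; ring
          have e2 : ((j : Int) + 1) * L = ((j * sl.length : Nat) : Int) + ((sl.length : Nat) : Int) := by
            rw [hLdef]; push_cast; ring
          rw [e1, e2, PySem.List.slice_natCast_add]
          exact this
      have hslice1 : PySem.List.slice hl (some (q * L)) none = hl.drop (q.toNat * sl.length) := by
        have e : q * L = ((q.toNat * sl.length : Nat) : Int) := by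
          rw [hLdef]; push_cast [hk]; ring
        rw [PySem.List.slice_from hl (by rw [e]; positivity)]
        rw [e, Int.toNat_natCast]
      by_cases hflag : pvALoop sl hl L (PySem.List.pyRange 0 q 1) = true
      · rw [if_pos hflag, hslice1]
        by_cases hcond : hl.drop (q.toNat * sl.length) = sl.take rem.toNat
        · rw [if_pos hcond,
            if_pos ((pv_rep_iff sl hl q.toNat rem.toNat).mp ⟨hloop.mp hflag, hcond⟩)]
        · rw [if_neg hcond,
            if_neg (fun hc => hcond ((pv_rep_iff sl hl q.toNat rem.toNat).mpr hc).2)]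
      · rw [if_neg hflag,
          if_neg (fun hc => hflag (hloop.mpr ((pv_rep_iff sl hl q.toNat rem.toNat).mpr hc).1))]
    · -- q < 0: A's loop is empty and its tail slice starts at a negative index;
      -- both conditions reduce to 'h = the first rem characters of s'
      have hqneg : q < 0 := by omega
      have hrange : PySem.List.pyRange 0 q 1 = [] := by
        simp [PySem.List.pyRange]; omega
      rw [hrange]
      have hflag : pvALoop sl hl L [] = true := rfl
      rw [if_pos hflag]
      have hq0nat : q.toNat = 0 := by omega
      have hm : ((-q).toNat : Int) = -q := Int.toNat_of_nonneg (by omega)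
      have hmL : sl.length ≤ (-q).toNat * sl.length := by
        have : 1 ≤ (-q).toNat := by omega
        calc sl.length = 1 * sl.length := (one_mul _).symm
          _ ≤ (-q).toNat * sl.length := Nat.mul_le_mul_right _ this
      have hslice1 : PySem.List.slice hl (some (q * L)) none
          = hl.drop (hl.length - (-q).toNat * sl.length) := by
        have e : q * L = -((((-q).toNat * sl.length : Nat) : Int)) := by
          rw [hLdef]; push_cast [hm]; ring
        have hpos : 0 < (-q).toNat * sl.length := by
          have : 1 ≤ (-q).toNat := by omega
          exact Nat.mul_pos this hLpos
        rw [e, PySem.List.slice_from_neg_natCast hl _ hpos]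
      rw [hslice1, hq0nat]
      simp only [List.replicate_zero, List.flatten_nil, List.nil_append]
      by_cases hcond : hl = sl.take rem.toNat
      · have hlen : hl.length = rem.toNat := by
          rw [hcond, List.length_take]; omega
        have : hl.length - (-q).toNat * sl.length = 0 := by omega
        rw [this, List.drop_zero, if_pos hcond, if_pos hcond]
      · rw [if_neg ?_, if_neg hcond]
        intro hdrop
        by_cases hsmall : hl.length ≤ (-q).toNat * sl.length
        · have : hl.length - (-q).toNat * sl.length = 0 := by omega
          rw [this, List.drop_zero] at hdrop
          exact hcond hdrop
        · have hlenL : (hl.drop (hl.length - (-q).toNat * sl.length)).length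
              = (-q).toNat * sl.length := by
            rw [List.length_drop]; omega
          have hlenR : (sl.take rem.toNat).length = rem.toNat := by
            rw [List.length_take]; omega
          have := congrArg List.length hdrop
          rw [hlenL, hlenR] at this
          omega
  · rw [if_pos (by simpa using hset), if_neg hset]

-- solution = sum of pvACheck
lemma solutionA_sum (S : List String) (h_ : String) (n : Int) :
    solution S h_ n = (S.map (fun s => pvACheck h_.toList n s.toList)).sum := by
  unfold solution
  have hstep : (fun (count : Int) (s : String) =>
      if ¬ (PySem.Set.equal (PySem.Set.ofList s.toList) (PySem.Set.ofList h_.toList) = true) then count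
      else
        let len_s : Int := s.toList.length
        let c : Int := PySem.Int.floordiv n len_s + 1
        let flag := pvALoop s.toList h_.toList len_s (PySem.List.pyRange 0 (c - 1) 1)
        if flag then
          if PySem.List.slice h_.toList (some ((c - 1) * len_s)) none
               = PySem.List.slice s.toList none (some (n - c * len_s)) then count + 1
          else count
        else count)
      = (fun (count : Int) (s : String) => count + pvACheck h_.toList n s.toList) := by
    funext count s
    unfold pvACheck
    dsimp only
    split_ifs <;> ring
  rw [hstep, PySem.List.foldl_add, Int.zero_add]

-- the memo-cache fold: as long as every cache entry stores the pvBCheck verdict of its key,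
-- the running count accumulates exactly pvBCheck per element
lemma pvB_fold (hl : List Char) (hset : PySem.Set Char) (n : Int) (S : List String)
    (cache : PySem.Dict String Int) (acc : Int)
    (hinv : ∀ s r, cache.get? s = some r → r = pvBCheck hl hset n s.toList) :
    (S.foldl (fun (st : PySem.Dict String Int × Int) s =>
      match st.1.get? s with
      | some r => (st.1, st.2 + r)
      | none =>
        let r := pvBCheck hl hset n s.toList
        (st.1.insert s r, st.2 + r)) (cache, acc)).2
    = acc + (S.map (fun s => pvBCheck hl hset n s.toList)).sum := by
  induction S generalizing cache acc with
  | nil => simp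
  | cons s rest ih =>
    simp only [List.foldl_cons, List.map_cons, List.sum_cons]
    cases hget : cache.get? s with
    | some r =>
      have hr := hinv s r hget
      dsimp only
      rw [ih cache (acc + r) hinv, hr]
      ring
    | none =>
      dsimp only
      rw [ih (cache.insert s (pvBCheck hl hset n s.toList)) _ ?_]
      · ring
      · intro s' r' hget'
        by_cases hss : s' = s
        · subst hss
          rw [PySem.Dict.get?_insert_self] at hget'
          exact (Option.some_inj.mp hget').symm
        · rw [PySem.Dict.get?_insert_of_ne _ _ hss] at hget'
          exact hinv s' r' hget'

lemma solutionB_sum (S : List String) (h_ : String) (n : Int) :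
    solution_alt S h_ n
      = (S.map (fun s => pvBCheck h_.toList (PySem.Set.ofList h_.toList) n s.toList)).sum := by
  unfold solution_alt
  rw [pvB_fold h_.toList (PySem.Set.ofList h_.toList) n S PySem.Dict.empty 0
    (fun s r hget => by simp [PySem.Dict.get?, PySem.Dict.empty] at hget)]
  ring

-- ===== VERDICT (by name: the statement is the Claim_ definition above) =====
theorem solution_spec : Claim_equal_solution := by
  intro S h_ n _hdom hpre
  unfold Spec_solution
  rw [solutionA_sum, solutionB_sum]
  congr 1
  apply List.map_congr_left
  intro s hs
  apply pvCheck_eq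
  rintro ⟨hh, hsnil⟩
  apply hpre
  exact ⟨String.toList_eq_nil_iff.mp hh, by
    have : s = "" := String.toList_eq_nil_iff.mp hsnil
    rwa [this] at hs⟩
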